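-- pv_equiv track=rewrite | github.com/anniegmatic/Zadania-maturalne | Matura próbna grudzień 2022/Zadanie 1/1,3.py | passa
-- ===== SOURCE A (Python) =====
-- def passa(mecz):
--     pasA = 1
--     maxpasA = 0
--     pasB = 1
--     maxpasB = 0
--     dA = 0
--     dB = 0
--
--     for i in range(len(mecz)-1):
--         if mecz[i] == "A":
--             pasB = 1
--             if mecz[i+1] == "A":
--                 pasA +=1
--                 if pasA >= 10 and pasA > maxpasA:
--                     maxpasA = pasA
--             if pasA >= 10 and mecz[i+1] == "B":
--                     dA += 1
--
--         elif mecz[i] == "B":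
--             pasA = 1
--             if mecz[i+1] == "B":
--                 pasB +=1
--                 if pasB >= 10 and pasB > maxpasB:
--                     maxpasB = pasB
--             if pasB >= 10 and mecz[i+1] == "A":
--                     dB += 1
--
--     wyn = str(dA + dB)
--     if maxpasA > maxpasB:
--         wyn += " A " + str(maxpasA)
--     else:
--         wyn += " B " + str(maxpasB)
--
--     return wyn
-- ===== SOURCE B (Python) =====
-- def _side(mecz, me, opp):
--     # one generic scan over adjacent pairs, tracking only this player's streak state
--     streak, best, ended = 1, 0, 0
--     for c, nxt in zip(mecz, mecz[1:]):
--         if c == opp: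
--             streak = 1
--         elif c == me:
--             if nxt == me:
--                 streak += 1
--                 if streak >= 10 and streak > best:
--                     best = streak
--             elif nxt == opp and streak >= 10:
--                 ended += 1
--     return best, ended
--
--
-- def passa(mecz):
--     bestA, dA = _side(mecz, "A", "B")
--     bestB, dB = _side(mecz, "B", "A")
--     tail = " A " + str(bestA) if bestA > bestB else " B " + str(bestB)
--     return str(dA + dB) + tail
-- ===== Notes on version B (the rewrite author's own statement) =====
-- stated objective: simpler
-- what changed: A's single index loop interleaving six state variables for both players is replaced by one generic per-player scan over the zipped adjacent-pair list, tracking only (streak, best, ended) and run once for each player.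
import Mathlib
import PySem

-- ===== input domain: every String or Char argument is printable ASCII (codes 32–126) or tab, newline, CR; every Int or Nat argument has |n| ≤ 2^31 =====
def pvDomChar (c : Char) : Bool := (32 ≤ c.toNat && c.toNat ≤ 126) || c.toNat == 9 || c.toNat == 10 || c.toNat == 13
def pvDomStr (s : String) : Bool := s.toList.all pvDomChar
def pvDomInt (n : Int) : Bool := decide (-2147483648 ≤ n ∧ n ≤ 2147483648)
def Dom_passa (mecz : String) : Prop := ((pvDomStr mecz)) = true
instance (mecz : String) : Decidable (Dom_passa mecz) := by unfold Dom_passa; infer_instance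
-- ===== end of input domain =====

-- B replaces A's single interleaved six-variable index loop by one generic per-player
-- scan over adjacent character pairs, run once for each player (objective: simpler).

-- ===== PORT A =====
-- loop body of A, as a function of the state and the pair (mecz[i], mecz[i+1]) read this iteration
def passaStep (s : Int × Int × Int × Int × Int × Int) (p : Char × Char) :
    Int × Int × Int × Int × Int × Int :=
  let (pasA, maxpasA, pasB, maxpasB, dA, dB) := s
  let (c, nx) := p
  if c = 'A' then
    let pasB : Int := 1
    let (pasA, maxpasA) :=
      if nx = 'A' then
        let pasA := pasA + 1
        (pasA, if 10 ≤ pasA ∧ maxpasA < pasA then pasA else maxpasA)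
      else (pasA, maxpasA)
    let dA := if 10 ≤ pasA ∧ nx = 'B' then dA + 1 else dA
    (pasA, maxpasA, pasB, maxpasB, dA, dB)
  else if c = 'B' then
    let pasA : Int := 1
    let (pasB, maxpasB) :=
      if nx = 'B' then
        let pasB := pasB + 1
        (pasB, if 10 ≤ pasB ∧ maxpasB < pasB then pasB else maxpasB)
      else (pasB, maxpasB)
    let dB := if 10 ≤ pasB ∧ nx = 'A' then dB + 1 else dB
    (pasA, maxpasA, pasB, maxpasB, dA, dB)
  else
    (pasA, maxpasA, pasB, maxpasB, dA, dB)

def passa (mecz : String) : String :=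
  let l := mecz.toList
  -- for i in range(len(mecz)-1): each iteration reads mecz[i], mecz[i+1]; the indices are
  -- always in range, so pyGetD with a dummy default is exact here
  let st := (PySem.List.pyRange 0 (PySem.Str.len mecz - 1) 1).foldl
      (fun s i => passaStep s (PySem.List.pyGetD l i ' ', PySem.List.pyGetD l (i + 1) ' '))
      (1, 0, 1, 0, 0, 0)
  let (_, maxpasA, _, maxpasB, dA, dB) := st
  let wyn := PySem.Int.toStr (dA + dB)
  if maxpasB < maxpasA then wyn ++ " A " ++ PySem.Int.toStr maxpasA
  else wyn ++ " B " ++ PySem.Int.toStr maxpasB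

-- ===== PORT B =====
-- Source B's generic per-player loop body over one adjacent pair
def sideStep (me opp : Char) (s : Int × Int × Int) (p : Char × Char) : Int × Int × Int :=
  let (streak, best, ended) := s
  let (c, nx) := p
  if c = opp then (1, best, ended)
  else if c = me then
    if nx = me then
      let streak := streak + 1
      (streak, if 10 ≤ streak ∧ best < streak then streak else best, ended)
    else if nx = opp ∧ 10 ≤ streak then (streak, best, ended + 1)
    else (streak, best, ended)
  else (streak, best, ended)

-- _side(mecz, me, opp): zip(mecz, mecz[1:]) is the list of adjacent pairs (drop 1 = the [1:] slice)
def side (mecz : String) (me opp : Char) : Int × Int :=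
  let r := ((mecz.toList).zip (mecz.toList.drop 1)).foldl (sideStep me opp) (1, 0, 0)
  (r.2.1, r.2.2)

def passa_alt (mecz : String) : String :=
  let (bestA, dA) := side mecz 'A' 'B'
  let (bestB, dB) := side mecz 'B' 'A'
  let tail := if bestB < bestA then " A " ++ PySem.Int.toStr bestA
              else " B " ++ PySem.Int.toStr bestB
  PySem.Int.toStr (dA + dB) ++ tail

-- ===== PRECONDITION & SPEC =====
def Spec_passa (mecz : String) (out : String) : Prop := out = passa_alt mecz
instance (mecz : String) (out : String) : Decidable (Spec_passa mecz out) := by unfold Spec_passa; infer_instance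

-- ===== CLAIM (what is proved, stated in full; the proofs are below) =====
def Claim_equal_passa : Prop := ∀ (mecz : String), Dom_passa mecz → Spec_passa mecz (passa mecz)

-- ===== LEMMAS AND PROOFS =====

theorem foldl_funext {σ α : Type} {f g : σ → α → σ} (h : ∀ s x, f s x = g s x)
    (l : List α) (init : σ) : l.foldl f init = l.foldl g init := by
  have : f = g := funext fun s => funext fun x => h s x
  rw [this]

-- A's index loop over range(len-1) reading (mecz[i], mecz[i+1]) is a fold over adjacent pairs
theorem fold_pairs_aux {σ : Type} (f : σ → Char × Char → σ) (t : List Char) :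
    ∀ (a : Char) (init : σ),
      (List.range t.length).foldl
          (fun (s : σ) (k : Nat) => f s ((a :: t).getD k ' ', (a :: t).getD (k + 1) ' ')) init
        = ((a :: t).zip t).foldl f init := by
  induction t with
  | nil => intro a init; rfl
  | cons b u ih =>
    intro a init
    rw [show (b :: u).length = u.length + 1 from rfl, List.range_succ_eq_map,
        List.foldl_cons, List.foldl_map]
    have hbody : ∀ (s : σ) (k : Nat),
        f s ((a :: b :: u).getD (k.succ) ' ', (a :: b :: u).getD (k.succ + 1) ' ')
          = f s ((b :: u).getD k ' ', (b :: u).getD (k + 1) ' ') := by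
      intro s k
      simp
    rw [foldl_funext hbody]
    show (List.range u.length).foldl _ (f init (a, b)) = _
    rw [show ((a :: b :: u).zip (b :: u)) = (a, b) :: ((b :: u).zip u) from rfl,
        List.foldl_cons]
    exact ih b (f init (a, b))

theorem fold_pairs {σ : Type} (f : σ → Char × Char → σ) (l : List Char) (init : σ) :
    (PySem.List.pyRange 0 ((l.length : Int) - 1) 1).foldl
        (fun s i => f s (PySem.List.pyGetD l i ' ', PySem.List.pyGetD l (i + 1) ' ')) init
      = (l.zip (l.drop 1)).foldl f init := by
  cases l with
  | nil =>
    rw [PySem.List.pyRange_one_eq_nil (by simp)]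
    rfl
  | cons a t =>
    have hn : ((a :: t).length : Int) - 1 = (t.length : Int) := by
      simp
    rw [hn, PySem.List.pyRange_one, List.foldl_map]
    have htn : ((t.length : Int) - 0).toNat = t.length := by omega
    rw [htn]
    have hbody : ∀ (s : σ) (k : Nat),
        f s (PySem.List.pyGetD (a :: t) (0 + (k : Int)) ' ',
             PySem.List.pyGetD (a :: t) (0 + (k : Int) + 1) ' ')
          = f s ((a :: t).getD k ' ', (a :: t).getD (k + 1) ' ') := by
      intro s k
      have h1 : (0 + (k : Int)) = ((k : Nat) : Int) := by ring
      have h2 : (0 + (k : Int) + 1) = ((k + 1 : Nat) : Int) := by push_cast; ring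
      rw [h2, h1, PySem.List.pyGetD_natCast, PySem.List.pyGetD_natCast]
    rw [foldl_funext hbody, List.drop_one, List.tail_cons]
    exact fold_pairs_aux f t a init

-- A's combined step is literally the pairing of the two per-player steps
theorem step_decomp (x y : Int × Int × Int) (p : Char × Char) :
    passaStep (x.1, x.2.1, y.1, y.2.1, x.2.2, y.2.2) p
      = ((sideStep 'A' 'B' x p).1, (sideStep 'A' 'B' x p).2.1,
         (sideStep 'B' 'A' y p).1, (sideStep 'B' 'A' y p).2.1,
         (sideStep 'A' 'B' x p).2.2, (sideStep 'B' 'A' y p).2.2) := by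
  obtain ⟨a1, a2, a3⟩ := x
  obtain ⟨b1, b2, b3⟩ := y
  obtain ⟨c, nx⟩ := p
  simp only [passaStep, sideStep]
  split_ifs <;> simp_all

theorem fold_decomp (ps : List (Char × Char)) :
    ∀ (x y : Int × Int × Int),
      ps.foldl passaStep (x.1, x.2.1, y.1, y.2.1, x.2.2, y.2.2)
        = ((ps.foldl (sideStep 'A' 'B') x).1, (ps.foldl (sideStep 'A' 'B') x).2.1,
           (ps.foldl (sideStep 'B' 'A') y).1, (ps.foldl (sideStep 'B' 'A') y).2.1,
           (ps.foldl (sideStep 'A' 'B') x).2.2, (ps.foldl (sideStep 'B' 'A') y).2.2) := by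
  induction ps with
  | nil => intro x y; rfl
  | cons p t ih =>
    intro x y
    rw [List.foldl_cons, step_decomp, List.foldl_cons, List.foldl_cons,
        ih (sideStep 'A' 'B' x p) (sideStep 'B' 'A' y p)]

-- ===== VERDICT (by name: the statement is the Claim_ definition above) =====
theorem passa_spec : Claim_equal_passa := by
  intro mecz _
  unfold Spec_passa passa passa_alt side
  dsimp only
  have hlen : PySem.Str.len mecz - 1 = ((mecz.toList.length : Int)) - 1 := by
    simp [PySem.Str.len_eq]
  rw [hlen, fold_pairs passaStep mecz.toList (1, 0, 1, 0, 0, 0),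
      show ((1 : Int), (0 : Int), (1 : Int), (0 : Int), (0 : Int), (0 : Int))
        = (((1 : Int), (0 : Int), (0 : Int)).1, ((1 : Int), (0 : Int), (0 : Int)).2.1,
           ((1 : Int), (0 : Int), (0 : Int)).1, ((1 : Int), (0 : Int), (0 : Int)).2.1,
           ((1 : Int), (0 : Int), (0 : Int)).2.2, ((1 : Int), (0 : Int), (0 : Int)).2.2) from rfl,
      fold_decomp]
  dsimp only
  split_ifs <;> simp [String.append_assoc]
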